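-- pv_equiv track=rewrite | github.com/Workofarttattoo/aios-unified | tools/autonomous_bounty_hunter_daemon.py | _estimate_earnings
-- ===== SOURCE A (Python) =====
-- from typing import List, Dict
--
-- def _estimate_earnings(vulnerabilities: List[Dict]) -> float:
--     """Estimate earnings based on vulnerability severity"""
--
--     # Average bounties by severity (conservative estimates)
--     bounty_estimates = {
--         "critical": 5000,
--         "high": 2000,
--         "medium": 500,
--         "low": 100,
--         "info": 0
--     }
--
--     total = 0
--     for vuln in vulnerabilities:
--         severity = vuln.get("severity", "info")
--         total += bounty_estimates.get(severity, 0)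
--
--     return total
-- ===== SOURCE B (Python) =====
-- from typing import List, Dict
--
-- def _estimate_earnings(vulnerabilities: List[Dict]) -> float:
--     """Estimate earnings: let the rate table drive the loop — for each paying
--     severity tier, count the vulnerabilities of that tier and weight the count."""
--     severities = [v.get("severity", "info") for v in vulnerabilities]
--     return sum(rate * severities.count(sev)
--                for sev, rate in (("critical", 5000), ("high", 2000),
--                                  ("medium", 500), ("low", 100)))
-- ===== Notes on version B (the rewrite author's own statement) =====
-- stated objective: alternative
-- what changed: Inverts the traversal: instead of one pass over the vulnerabilities with a per-element rate lookup, B loops over the fixed rate table and, for each paying tier, counts the vulnerabilities of that severity and multiplies the count by the rate (zero-rate/unknown severities are never looked at).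
import Mathlib
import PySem

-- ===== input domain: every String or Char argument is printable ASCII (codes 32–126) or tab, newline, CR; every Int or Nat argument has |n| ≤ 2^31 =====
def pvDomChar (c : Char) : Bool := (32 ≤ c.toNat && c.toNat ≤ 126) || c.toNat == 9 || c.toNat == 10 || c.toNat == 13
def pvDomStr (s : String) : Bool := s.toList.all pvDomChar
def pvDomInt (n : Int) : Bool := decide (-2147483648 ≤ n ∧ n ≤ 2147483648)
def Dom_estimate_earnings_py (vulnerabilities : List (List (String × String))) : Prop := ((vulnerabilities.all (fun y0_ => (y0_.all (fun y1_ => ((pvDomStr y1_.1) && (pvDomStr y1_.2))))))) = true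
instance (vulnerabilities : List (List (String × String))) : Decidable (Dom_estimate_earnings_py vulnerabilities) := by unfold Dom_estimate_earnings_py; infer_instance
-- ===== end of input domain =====

-- B inverts the traversal: it loops over the fixed paying rate tiers and counts the vulnerabilities of each tier, instead of A's per-element rate lookup (alternative decomposition, same cost).

-- ===== PORT A =====
def estimate_earnings_py (vulnerabilities : List (List (String × String))) : Int :=
  let bounty_estimates : PySem.Dict String Int :=
    PySem.Dict.mk [("critical", 5000), ("high", 2000), ("medium", 500), ("low", 100), ("info", 0)]
  vulnerabilities.foldl
    (fun total vuln =>
      let severity := (PySem.Dict.mk vuln).getD "severity" "info"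
      total + bounty_estimates.getD severity 0) 0

-- ===== PORT B =====
def estimate_earnings_py_alt (vulnerabilities : List (List (String × String))) : Int :=
  let severities : List String :=
    vulnerabilities.map (fun v => (PySem.Dict.mk v).getD "severity" "info")
  (([("critical", (5000:Int)), ("high", 2000), ("medium", 500), ("low", 100)]).map
    (fun p => p.2 * (PySem.List.count severities p.1 : Int))).sum

-- ===== PRECONDITION & SPEC =====
def Spec_estimate_earnings_py (vulnerabilities : List (List (String × String))) (out : Int) : Prop := out = estimate_earnings_py_alt vulnerabilities
instance (vulnerabilities : List (List (String × String))) (out : Int) : Decidable (Spec_estimate_earnings_py vulnerabilities out) := by unfold Spec_estimate_earnings_py; infer_instance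

-- ===== CLAIM (what is proved, stated in full; the proofs are below) =====
def Claim_equal_estimate_earnings_py : Prop := ∀ (vulnerabilities : List (List (String × String))), Dom_estimate_earnings_py vulnerabilities → Spec_estimate_earnings_py vulnerabilities (estimate_earnings_py vulnerabilities)

-- ===== LEMMAS AND PROOFS =====

-- the rate of one element equals its contribution summed over the four paying tiers
theorem rate_eq_tier_sum (x : String) :
    (PySem.Dict.mk [("critical", (5000:Int)), ("high", 2000), ("medium", 500), ("low", 100), ("info", 0)]).getD x 0
      = (([("critical", (5000:Int)), ("high", 2000), ("medium", 500), ("low", 100)]).map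
          (fun p => p.2 * (if p.1 = x then 1 else 0))).sum := by
  by_cases h1 : "critical" = x
  · subst h1; decide
  by_cases h2 : "high" = x
  · subst h2; decide
  by_cases h3 : "medium" = x
  · subst h3; decide
  by_cases h4 : "low" = x
  · subst h4; decide
  simp only [PySem.Dict.getD_eq_get?_getD, PySem.Dict.get?_mk_cons, beq_iff_eq,
    if_neg h1, if_neg h2, if_neg h3, if_neg h4, List.map_cons, List.map_nil,
    List.sum_cons, List.sum_nil]
  split <;> simp [PySem.Dict.get?]

-- sum over the tiers of rate × count  =  sum of per-element rates
theorem tier_sum_eq (xs : List String) :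
    (([("critical", (5000:Int)), ("high", 2000), ("medium", 500), ("low", 100)]).map
        (fun p => p.2 * (PySem.List.count xs p.1 : Int))).sum
      = (xs.map (fun x =>
          (PySem.Dict.mk [("critical", (5000:Int)), ("high", 2000), ("medium", 500), ("low", 100), ("info", 0)]).getD x 0)).sum := by
  induction xs with
  | nil => decide
  | cons x t ih =>
      have hc : ∀ s : String, (PySem.List.count (x :: t) s : Int)
          = (PySem.List.count t s : Int) + (if s = x then 1 else 0) := by
        intro s
        rcases eq_or_ne s x with h | h
        · subst h; simp [PySem.List.count_eq, List.count_cons]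
        · simp [PySem.List.count_eq, List.count_cons, h, Ne.symm h]
      have hmap : (([("critical", (5000:Int)), ("high", 2000), ("medium", 500), ("low", 100)]).map
            (fun p => p.2 * (PySem.List.count (x :: t) p.1 : Int)))
          = ([("critical", (5000:Int)), ("high", 2000), ("medium", 500), ("low", 100)]).map
            (fun p => p.2 * (PySem.List.count t p.1 : Int) + p.2 * (if p.1 = x then 1 else 0)) :=
        List.map_congr_left (fun p _ => by rw [hc p.1]; ring)
      rw [hmap, List.sum_map_add, ih, ← rate_eq_tier_sum x, List.map_cons, List.sum_cons]
      ring

-- A's left fold accumulates exactly the sum of the mapped rates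
theorem foldl_add_rate (vs : List (List (String × String))) :
    vs.foldl
      (fun total vuln =>
        total + (PySem.Dict.mk [("critical", (5000:Int)), ("high", 2000), ("medium", 500), ("low", 100), ("info", 0)]).getD
          ((PySem.Dict.mk vuln).getD "severity" "info") 0) 0
    = (vs.map (fun v =>
        (PySem.Dict.mk [("critical", (5000:Int)), ("high", 2000), ("medium", 500), ("low", 100), ("info", 0)]).getD
          ((PySem.Dict.mk v).getD "severity" "info") 0)).sum := by
  induction vs using List.reverseRecOn with
  | nil => rfl
  | append_singleton l v ih => simp [ih]

-- ===== VERDICT (by name: the statement is the Claim_ definition above) =====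
theorem estimate_earnings_py_spec : Claim_equal_estimate_earnings_py := by
  intro vulnerabilities _
  unfold Spec_estimate_earnings_py estimate_earnings_py estimate_earnings_py_alt
  dsimp only
  rw [foldl_add_rate, tier_sum_eq, List.map_map]
  rfl
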